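-- pv_equiv track=rewrite | github.com/VikramadityaKhupse/PythonLab | binary_subtraction.py | binary_subtraction
-- ===== SOURCE A (Python) =====
-- def binary_char_to_int(char: str) -> int:
--     if char == '0':
--         return 0
--     elif char == '1':
--         return 1
--     else:
--         raise ValueError(f"Invalid binary character: {char}")
--
-- def binary_subtraction(bin1, bin2):
--     max_len = max(len(bin1), len(bin2))
--     bin1 = bin1.zfill(max_len)
--     bin2 = bin2.zfill(max_len)
--
--     result = ''
--     borrow = 0
--
--     for i in range(max_len - 1, -1, -1):
--         bit1 = binary_char_to_int(bin1[i])
--         bit2 = binary_char_to_int(bin2[i])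
--
--         sub = bit1 - bit2 - borrow
--
--         if sub == -1:
--             borrow = 1
--             result = '1' + result
--         elif sub == -2:
--             borrow = 1
--             result = '0' + result
--         else:
--             borrow = 0
--             result = str(sub) + result
--
--     return result.lstrip('0') or '0'
-- ===== SOURCE B (Python) =====
-- def binary_subtraction(bin1, bin2):
--     max_len = max(len(bin1), len(bin2))
--     if max_len == 0:
--         return '0'
--     for s in (bin1, bin2):
--         for ch in s:
--             if ch not in '01':
--                 raise ValueError(f"Invalid binary character: {ch}")
--     diff = (int(bin1 or '0', 2) - int(bin2 or '0', 2)) % (2 ** max_len)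
--     return format(diff, 'b')
-- ===== Notes on version B (the rewrite author's own statement) =====
-- stated objective: idiomatic
-- what changed: Replaces the per-bit borrow-propagation loop and string prepending by closed-form integer arithmetic: validate the digits, compute (int(bin1,2) - int(bin2,2)) mod 2**max_len and render it with format(diff,'b').
import Mathlib
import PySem

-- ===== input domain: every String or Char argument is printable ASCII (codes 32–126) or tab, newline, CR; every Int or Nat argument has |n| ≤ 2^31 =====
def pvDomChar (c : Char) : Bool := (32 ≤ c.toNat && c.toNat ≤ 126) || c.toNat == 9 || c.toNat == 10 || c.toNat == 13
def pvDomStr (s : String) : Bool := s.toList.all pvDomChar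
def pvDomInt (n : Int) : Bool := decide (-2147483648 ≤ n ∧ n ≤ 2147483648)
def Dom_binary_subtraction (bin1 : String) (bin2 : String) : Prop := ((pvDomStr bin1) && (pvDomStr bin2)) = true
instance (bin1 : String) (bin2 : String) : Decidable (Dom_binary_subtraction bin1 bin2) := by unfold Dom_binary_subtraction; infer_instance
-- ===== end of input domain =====

-- B replaces A's per-bit borrow loop by closed-form integer arithmetic:
-- (int(bin1,2) - int(bin2,2)) mod 2^max_len, rendered in binary (objective: idiomatic).

-- ===== PORT A =====
-- binary_char_to_int raises ValueError on a non-binary char: ported as Option (none = raise)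
def binary_char_to_int (c : Char) : Option Int :=
  if c = '0' then some 0 else if c = '1' then some 1 else none

-- one iteration of A's for-loop: state = (result chars, borrow), threaded through Option
def subStep (st : Option (List Char × Int)) (p : Char × Char) : Option (List Char × Int) :=
  match st with
  | none => none
  | some (result, borrow) =>
    match binary_char_to_int p.1, binary_char_to_int p.2 with
    | some bit1, some bit2 =>
      let sub := bit1 - bit2 - borrow
      if sub = -1 then some ('1' :: result, 1)
      else if sub = -2 then some ('0' :: result, 1)
      else some ((PySem.Int.toStr sub).toList ++ result, 0)
    | _, _ => none

-- 'for i in range(max_len-1,-1,-1)' reading bin1[i], bin2[i] = a left fold over the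
-- reversed zipped padded strings (both have length max_len after zfill)
def binary_subtraction (bin1 : String) (bin2 : String) : String :=
  let max_len := max bin1.toList.length bin2.toList.length
  let b1 := PySem.Chars.zfill bin1.toList max_len
  let b2 := PySem.Chars.zfill bin2.toList max_len
  match (List.zip b1.reverse b2.reverse).foldl subStep (some ([], 0)) with
  | some (result, _) =>
      let s := result.dropWhile (· = '0')   -- result.lstrip('0')
      if s.isEmpty then "0" else String.mk s  -- … or '0'
  | none => ""                               -- a ValueError propagated (outside Pre_)

-- ===== PORT B =====
-- format(n, 'b') for a nonnegative int: exact hand port (MSB-first binary digits)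
def natToBinAux : Nat → List Char → List Char
  | 0, acc => acc
  | n+1, acc => natToBinAux ((n+1)/2) ((if (n+1) % 2 = 1 then '1' else '0') :: acc)

def natToBin (n : Nat) : List Char := if n = 0 then ['0'] else natToBinAux n []

-- int(s, 2) on a validated '0'/'1' string: exact there
def bitsVal (l : List Char) : Int :=
  l.foldl (fun a c => 2 * a + (if c = '1' then 1 else 0)) 0

def binary_subtraction_alt (bin1 : String) (bin2 : String) : String :=
  let l1 := bin1.toList
  let l2 := bin2.toList
  let max_len := max l1.length l2.length
  if max_len = 0 then "0"
  else if l1.all (fun c => c = '0' || c = '1') && l2.all (fun c => c = '0' || c = '1') then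
    let diff := PySem.Int.mod (bitsVal l1 - bitsVal l2) (2 ^ max_len)
    String.mk (natToBin diff.toNat)
  else ""   -- Source B raises ValueError here (outside Pre_)

-- ===== PRECONDITION & SPEC =====
-- Pre_ excludes exactly the inputs containing a character other than '0'/'1',
-- on which A (and B) raise ValueError.
def Pre_binary_subtraction (bin1 : String) (bin2 : String) : Prop :=
  bin1.toList.all (fun c => c = '0' || c = '1') = true ∧
  bin2.toList.all (fun c => c = '0' || c = '1') = true
instance (bin1 : String) (bin2 : String) : Decidable (Pre_binary_subtraction bin1 bin2) := by
  unfold Pre_binary_subtraction; infer_instance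

def pvWitness_binary_subtraction : String × String := ("1011", "110")

def Spec_binary_subtraction (bin1 : String) (bin2 : String) (out : String) : Prop := out = binary_subtraction_alt bin1 bin2
instance (bin1 : String) (bin2 : String) (out : String) : Decidable (Spec_binary_subtraction bin1 bin2 out) := by unfold Spec_binary_subtraction; infer_instance

-- ===== CLAIM (what is proved, stated in full; the proofs are below) =====
def Claim_equal_binary_subtraction : Prop := ∀ (bin1 : String) (bin2 : String), Dom_binary_subtraction bin1 bin2 → Pre_binary_subtraction bin1 bin2 → Spec_binary_subtraction bin1 bin2 (binary_subtraction bin1 bin2)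

-- ===== LEMMAS AND PROOFS =====

-- value of a bit string read MSB-first
def nval : List Char → Nat
  | [] => 0
  | c :: rest => (if c = '1' then 1 else 0) * 2 ^ rest.length + nval rest

-- value of a bit string read LSB-first
def lval : List Char → Nat
  | [] => 0
  | c :: rest => (if c = '1' then 1 else 0) + 2 * lval rest

def validBits (l : List Char) : Prop := ∀ c ∈ l, c = '0' ∨ c = '1'

theorem nval_append_singleton (l : List Char) (c : Char) :
    nval (l ++ [c]) = 2 * nval l + (if c = '1' then 1 else 0) := by
  induction l with
  | nil => simp [nval]
  | cons d rest ih =>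
      simp only [List.cons_append, nval, ih, List.length_append, List.length_cons,
        List.length_nil]
      split_ifs <;> ring

theorem lval_append_singleton (l : List Char) (c : Char) :
    lval (l ++ [c]) = lval l + (if c = '1' then 1 else 0) * 2 ^ l.length := by
  induction l with
  | nil => simp [lval]
  | cons d rest ih => simp [lval, ih]; split_ifs <;> ring

theorem lval_reverse (l : List Char) : lval l.reverse = nval l := by
  induction l with
  | nil => rfl
  | cons c rest ih =>
      simp [nval, List.reverse_cons, lval_append_singleton, ih]; ring

theorem nval_lt (l : List Char) : nval l < 2 ^ l.length := by
  induction l with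
  | nil => simp [nval]
  | cons c rest ih =>
      simp only [nval, List.length_cons, pow_succ]
      split <;> omega

theorem nval_replicate_zero (k : Nat) (l : List Char) :
    nval (List.replicate k '0' ++ l) = nval l := by
  induction k with
  | zero => rfl
  | succ n ih => simp [List.replicate_succ, nval, ih]

theorem bitsVal_eq_nval (l : List Char) : bitsVal l = (nval l : Int) := by
  suffices H : ∀ (l : List Char) (a : Int),
      l.foldl (fun a c => 2 * a + (if c = '1' then 1 else 0)) a
        = a * 2 ^ l.length + (nval l : Int) by
    simpa [bitsVal] using H l 0
  intro l
  induction l with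
  | nil => intro a; simp [nval]
  | cons c rest ih =>
      intro a
      simp only [List.foldl_cons, ih, nval, List.length_cons]
      push_cast
      ring

-- the borrow-loop invariant: processing LSB-first pairs from state (acc, b) yields
-- some (bits ++ acc, B) with bits the base-2 digits of v1 - v2 - b + B·2^k
theorem loop_inv (r1 r2 : List Char) (acc : List Char) (b : Int)
    (hlen : r1.length = r2.length) (h1 : validBits r1) (h2 : validBits r2)
    (hb : b = 0 ∨ b = 1) :
    ∃ bits B, (List.zip r1 r2).foldl subStep (some (acc, b)) = some (bits ++ acc, B) ∧
      (B = 0 ∨ B = 1) ∧ bits.length = r1.length ∧ validBits bits ∧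
      (nval bits : Int) = (lval r1 : Int) - lval r2 - b + B * 2 ^ r1.length := by
  induction r1 generalizing r2 acc b with
  | nil =>
      have hr2 : r2 = [] := List.length_eq_zero_iff.mp hlen.symm
      subst hr2
      exact ⟨[], b, by simp, hb, rfl, fun c hc => by simp at hc,
        by simp [nval, lval]; try ring⟩
  | cons c1 rest1 ih =>
      cases r2 with
      | nil => simp at hlen
      | cons c2 rest2 =>
          have hc1 := h1 c1 (List.mem_cons_self ..)
          have hc2 := h2 c2 (List.mem_cons_self ..)
          have hlen' : rest1.length = rest2.length := by simpa using hlen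
          have h1' : validBits rest1 := fun c hc => h1 c (List.mem_cons_of_mem _ hc)
          have h2' : validBits rest2 := fun c hc => h2 c (List.mem_cons_of_mem _ hc)
          -- the step produces a digit d and a new borrow b' with
          -- (digit value) - 2*b' = bit1 - bit2 - b
          obtain ⟨d, b', hstep, hd, hb', hdv⟩ :
              ∃ d b', subStep (some (acc, b)) (c1, c2) = some (d :: acc, b') ∧
                (d = '0' ∨ d = '1') ∧ (b' = 0 ∨ b' = 1) ∧
                (if d = '1' then (1:Int) else 0) - 2 * b'
                  = (if c1 = '1' then (1:Int) else 0) - (if c2 = '1' then 1 else 0) - b := by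
            rcases hc1 with rfl | rfl <;> rcases hc2 with rfl | rfl <;>
              rcases hb with rfl | rfl <;>
              first
                | exact ⟨'0', 0, rfl, by decide, by decide, by decide⟩
                | exact ⟨'1', 0, rfl, by decide, by decide, by decide⟩
                | exact ⟨'0', 1, rfl, by decide, by decide, by decide⟩
                | exact ⟨'1', 1, rfl, by decide, by decide, by decide⟩
          obtain ⟨bits, B, hfold, hB, hblen, hbv, hval⟩ :=
            ih rest2 (d :: acc) b' hlen' h1' h2' hb'
          refine ⟨bits ++ [d], B, ?_, hB, by simp [hblen], ?_, ?_⟩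
          · simpa [hstep, hfold] using hfold
          · intro c hc
            rcases List.mem_append.mp hc with hc | hc
            · exact hbv c hc
            · simpa using (List.mem_singleton.mp hc ▸ hd)
          · have hns := nval_append_singleton bits d
            simp only [lval, List.length_cons]
            push_cast [hns, hblen, lval]
            have hpow : (2:Int) ^ (rest1.length + 1) = 2 * 2 ^ rest1.length := by ring
            rw [hpow]
            linarith [hval, hdv]

-- natToBinAux unrolled
theorem natToBinAux_acc (n : Nat) (acc : List Char) :
    natToBinAux n acc = natToBinAux n [] ++ acc := by
  induction n using Nat.strong_induction_on generalizing acc with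
  | _ n ih =>
      match n with
      | 0 => simp [natToBinAux]
      | n+1 =>
          rw [natToBinAux, natToBinAux,
            ih ((n+1)/2) (by omega) ((if (n+1) % 2 = 1 then '1' else '0') :: acc),
            ih ((n+1)/2) (by omega) [(if (n+1) % 2 = 1 then '1' else '0')]]
          simp

theorem natToBinAux_pos (n : Nat) (hn : 0 < n) :
    natToBinAux n [] = natToBinAux (n / 2) [] ++ [if n % 2 = 1 then '1' else '0'] := by
  match n, hn with
  | n+1, _ => rw [natToBinAux, natToBinAux_acc]

theorem natToBinAux_ne_nil (n : Nat) (hn : 0 < n) : natToBinAux n [] ≠ [] := by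
  rw [natToBinAux_pos n hn]; simp

theorem natToBinAux_double (v : Nat) (hv : 0 < v) (c : Char) (hc : c = '0' ∨ c = '1') :
    natToBinAux (2 * v + (if c = '1' then 1 else 0)) [] = natToBinAux v [] ++ [c] := by
  have h2 : 2 * v / 2 = v := by omega
  have h3 : (2 * v + 1) / 2 = v := by omega
  have h4 : 2 * v % 2 = 0 := by omega
  have h5 : (2 * v + 1) % 2 = 1 := by omega
  rcases hc with rfl | rfl
  · rw [show 2 * v + (if ('0':Char) = '1' then 1 else 0) = 2 * v by simp,
      natToBinAux_pos _ (by omega), h2, h4]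
    simp
  · rw [show 2 * v + (if ('1':Char) = '1' then 1 else 0) = 2 * v + 1 by simp,
      natToBinAux_pos _ (by omega), h3, h5]
    simp

-- a valid bit string beginning with '1' is exactly the binary rendering of its value
theorem natToBinAux_nval (l : List Char) (h : validBits l) (hh : l.head? = some '1') :
    natToBinAux (nval l) [] = l := by
  induction l using List.reverseRecOn with
  | nil => simp at hh
  | append_singleton xs c ihx =>
      cases xs with
      | nil =>
          have hc1 : c = '1' := by simpa using hh
          subst hc1
          have h1 : nval ([] ++ ['1']) = 1 := by simp [nval]
          rw [h1, natToBinAux_pos 1 one_pos]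
          norm_num [natToBinAux]
      | cons x rest =>
          have hh' : (x :: rest).head? = some '1' := by simpa using hh
          have hx : x = '1' := by simpa using hh'
          have hval : validBits (x :: rest) := fun d hd =>
            h d (List.mem_append.mpr (Or.inl hd))
          have hc : c = '0' ∨ c = '1' := h c (by simp)
          have hpos : 0 < nval (x :: rest) := by
            subst hx
            have h2p := Nat.two_pow_pos rest.length
            simp [nval]
          rw [nval_append_singleton, natToBinAux_double _ hpos c hc,
            ihx hval hh']

theorem dropWhile_zeros (l : List Char) (h : validBits l) :
    l.dropWhile (· = '0') = natToBinAux (nval l) [] := by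
  induction l with
  | nil => simp [nval, natToBinAux]
  | cons c rest ih =>
      rcases h c (List.mem_cons_self ..) with rfl | rfl
      · have : nval ('0' :: rest) = nval rest := by simp [nval]
        rw [List.dropWhile_cons_of_pos (by decide), this,
          ih (fun d hd => h d (List.mem_cons_of_mem _ hd))]
      · rw [List.dropWhile_cons_of_neg (by decide)]
        exact (natToBinAux_nval ('1' :: rest) h rfl).symm

theorem zfill_valid (l : List Char) (m : Nat) (h : validBits l) :
    PySem.Chars.zfill l (m : Int) = List.replicate (m - l.length) '0' ++ l := by
  by_cases hm : (m : Int) ≤ l.length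
  · have : m - l.length = 0 := by omega
    simp [PySem.Chars.zfill, hm, this]
  · cases l with
    | nil => simp [PySem.Chars.zfill, hm]
    | cons c rest =>
        rcases h c (List.mem_cons_self ..) with rfl | rfl <;>
          · simp [PySem.Chars.zfill]
            intro hle
            omega

theorem zfill_validBits (l : List Char) (m : Nat) (h : validBits l) :
    validBits (PySem.Chars.zfill l (m : Int)) := by
  rw [zfill_valid l m h]
  intro c hc
  rcases List.mem_append.mp hc with hc | hc
  · exact Or.inl (List.eq_of_mem_replicate hc)
  · exact h c hc

theorem length_zfill_nat (l : List Char) (m : Nat) (hm : l.length ≤ m) (h : validBits l) :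
    (PySem.Chars.zfill l (m : Int)).length = m := by
  rw [zfill_valid l m h]; simp; omega

-- ===== VERDICT (by name: the statement is the Claim_ definition above) =====
theorem binary_subtraction_spec : Claim_equal_binary_subtraction := by
  intro bin1 bin2 _ hpre
  obtain ⟨h1, h2⟩ := hpre
  have v1 : validBits bin1.toList := by
    intro c hc; have := List.all_eq_true.mp h1 c hc; simpa using this
  have v2 : validBits bin2.toList := by
    intro c hc; have := List.all_eq_true.mp h2 c hc; simpa using this
  unfold Spec_binary_subtraction binary_subtraction binary_subtraction_alt
  set l1 := bin1.toList with hl1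
  set l2 := bin2.toList with hl2
  set m := max l1.length l2.length with hm
  by_cases hm0 : m = 0
  · -- both strings empty: loop body empty, result '' → "0"
    have e1 : l1 = [] := List.length_eq_zero_iff.mp (by omega)
    have e2 : l2 = [] := List.length_eq_zero_iff.mp (by omega)
    simp [e1, e2, PySem.Chars.zfill, ← hm, hm0]
  · -- m > 0
    have hz1 := zfill_valid l1 m v1
    have hz2 := zfill_valid l2 m v2
    have hv1 := zfill_validBits l1 m v1
    have hv2 := zfill_validBits l2 m v2
    have hL1 : (PySem.Chars.zfill l1 (m : Int)).length = m :=
      length_zfill_nat l1 m (le_max_left _ _) v1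
    have hL2 : (PySem.Chars.zfill l2 (m : Int)).length = m :=
      length_zfill_nat l2 m (le_max_right _ _) v2
    obtain ⟨bits, B, hfold, hB, hblen, hbv, hval⟩ :=
      loop_inv (PySem.Chars.zfill l1 (m:Int)).reverse (PySem.Chars.zfill l2 (m:Int)).reverse
        [] 0 (by simp [hL1, hL2])
        (fun c hc => hv1 c (List.mem_reverse.mp hc))
        (fun c hc => hv2 c (List.mem_reverse.mp hc)) (Or.inl rfl)
    rw [List.length_reverse, hL1] at hblen hval
    rw [lval_reverse, lval_reverse] at hval
    have hn1 : nval (PySem.Chars.zfill l1 (m:Int)) = nval l1 := by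
      rw [hz1]; exact nval_replicate_zero _ _
    have hn2 : nval (PySem.Chars.zfill l2 (m:Int)) = nval l2 := by
      rw [hz2]; exact nval_replicate_zero _ _
    rw [hn1, hn2] at hval
    -- bits is the m-digit representation of (n1 - n2) mod 2^m
    have hmodpos : (0:Int) < 2 ^ m := by positivity
    have hbits_lt : (nval bits : Int) < 2 ^ m := by
      have := nval_lt bits
      rw [hblen] at this
      exact_mod_cast this
    have hmod : (nval bits : Int) = ((nval l1 : Int) - nval l2) % 2 ^ m := by
      have hx : ((nval l1 : Int) - nval l2) % 2 ^ m
          = ((nval l1 : Int) - nval l2 + B * 2 ^ m) % 2 ^ m := by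
        simp [Int.add_mul_emod_self_left]
      have hy : (nval l1 : Int) - nval l2 + B * 2 ^ m = (nval bits : Int) := by
        linarith [hval]
      rw [hx, hy, Int.emod_eq_of_lt (by positivity) hbits_lt]
    -- assemble
    rw [List.append_nil] at hfold
    simp only [hfold]
    have hcond : ((l1.all fun c => decide (c = '0') || decide (c = '1')) &&
        (l2.all fun c => decide (c = '0') || decide (c = '1'))) = true := by
      simp [h1, h2]
    rw [if_neg hm0, if_pos hcond,
      bitsVal_eq_nval l1, bitsVal_eq_nval l2,
      PySem.Int.mod_eq_emod_of_pos hmodpos, ← hmod]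
    simp only [Int.toNat_natCast]
    rw [dropWhile_zeros bits hbv]
    by_cases hz : nval bits = 0
    · rw [hz]
      have h0 : natToBinAux 0 [] = [] := by simp [natToBinAux]
      rw [h0]
      simp [natToBin]
      decide
    · have hne := natToBinAux_ne_nil (nval bits) (Nat.pos_of_ne_zero hz)
      rw [natToBin, if_neg hz]
      simp [List.isEmpty_iff, hne]
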